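-- pv_equiv track=rewrite | github.com/Tsukasane/FlowModel | flow.py | delete_zeros_from_segments
-- ===== SOURCE A (Python) =====
-- def delete_zeros_from_segments(lst, num_to_delete=1):
--     if num_to_delete == -1: # no 0
--         return lst
--     result = []
--     i = 0
--     n = len(lst)
--     while i < n:
--         if lst[i] != 0:
--             result.append(lst[i])
--             i += 1
--         else:
--             start = i
--             while i < n and lst[i] == 0:
--                 i += 1
--             segment_len = i - start
--             remaining_zeros = [0] * max(0, segment_len - num_to_delete)
--             result.extend(remaining_zeros)
--     return result
-- ===== SOURCE B (Python) =====
-- def delete_zeros_from_segments(lst, num_to_delete=1):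
--     if num_to_delete == -1:  # no 0
--         return lst
--     # stage 1: run-length encode the whole list into (value, count) runs
--     runs = []
--     for x in lst:
--         if runs and runs[-1][0] == x:
--             runs[-1][1] += 1
--         else:
--             runs.append([x, 1])
--     # stage 2: expand the encoding, shrinking each zero run
--     out = []
--     for v, c in runs:
--         out.extend([0] * max(0, c - num_to_delete) if v == 0 else [v] * c)
--     return out
-- ===== Notes on version B (the rewrite author's own statement) =====
-- stated objective: alternative
-- what changed: Replaces A's single index-walk with a nested zero-scanning while loop by two staged passes over an intermediate run-length encoding: first compress the list into (value, count) runs, then expand the runs, shrinking each zero run by num_to_delete.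
import Mathlib
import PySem

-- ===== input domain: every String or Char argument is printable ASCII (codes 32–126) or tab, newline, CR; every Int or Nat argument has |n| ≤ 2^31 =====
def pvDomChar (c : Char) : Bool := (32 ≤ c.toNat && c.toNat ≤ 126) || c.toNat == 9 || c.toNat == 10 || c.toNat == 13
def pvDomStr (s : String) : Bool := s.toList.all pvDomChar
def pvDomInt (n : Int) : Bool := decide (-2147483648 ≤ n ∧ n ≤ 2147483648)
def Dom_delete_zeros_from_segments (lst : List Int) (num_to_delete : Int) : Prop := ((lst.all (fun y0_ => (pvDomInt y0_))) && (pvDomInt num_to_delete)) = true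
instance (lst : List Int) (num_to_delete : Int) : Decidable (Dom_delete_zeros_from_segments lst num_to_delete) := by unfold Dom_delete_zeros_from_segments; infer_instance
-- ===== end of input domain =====

-- B replaces A's single index-walk (with nested zero-scanning while loop) by two staged
-- passes through an intermediate run-length encoding (same asymptotic cost; 'alternative').


-- ===== PORT A =====
-- 'while i < n and lst[i] == 0: i += 1' — the inner while counts the leading zeros
def pvCountZeros : List Int → Nat
  | [] => 0
  | x :: xs => if x = 0 then pvCountZeros xs + 1 else 0

-- the outer 'while i < n' loop of A, as recursion on the remaining suffix of lst
def pvALoop (k : Int) : List Int → List Int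
  | [] => []
  | x :: xs =>
    if x ≠ 0 then
      x :: pvALoop k xs
    else
      -- segment_len = i - start; remaining_zeros = [0] * max(0, segment_len - num_to_delete)
      let seg := pvCountZeros (x :: xs)
      List.replicate ((Int.ofNat seg - k)).toNat 0 ++ pvALoop k (List.drop seg (x :: xs))
termination_by xs => xs.length
decreasing_by
  · simp only [List.length_cons]; omega
  · have hx0 : x = 0 := of_not_not (by assumption)
    have hseg : 1 ≤ pvCountZeros (x :: xs) := by
      subst hx0; simp [pvCountZeros]
    simp only [List.length_drop, List.length_cons]
    omega

def delete_zeros_from_segments (lst : List Int) (num_to_delete : Int) : List Int :=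
  if num_to_delete = -1 then lst else pvALoop num_to_delete lst

-- ===== PORT B =====
-- stage 1 of Source B: one step of the run-length-encoding loop
-- ('if runs and runs[-1][0] == x: runs[-1][1] += 1 else: runs.append([x, 1])')
def pvStep (runs : List (Int × Int)) (x : Int) : List (Int × Int) :=
  match runs.getLast? with
  | some (v, c) => if v = x then runs.dropLast ++ [(v, c + 1)] else runs ++ [(x, 1)]
  | none => [(x, 1)]

-- stage 2 of Source B: '[0] * max(0, c - num_to_delete) if v == 0 else [v] * c'
def pvDec (k : Int) (p : Int × Int) : List Int :=
  if p.1 = 0 then List.replicate (p.2 - k).toNat 0 else List.replicate p.2.toNat p.1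

def delete_zeros_from_segments_alt (lst : List Int) (num_to_delete : Int) : List Int :=
  if num_to_delete = -1 then lst
  else
    let runs := lst.foldl pvStep []
    runs.foldl (fun out p => out ++ pvDec num_to_delete p) []

-- ===== PRECONDITION & SPEC =====
def Spec_delete_zeros_from_segments (lst : List Int) (num_to_delete : Int) (out : List Int) : Prop := out = delete_zeros_from_segments_alt lst num_to_delete
instance (lst : List Int) (num_to_delete : Int) (out : List Int) : Decidable (Spec_delete_zeros_from_segments lst num_to_delete out) := by unfold Spec_delete_zeros_from_segments; infer_instance

-- ===== CLAIM (what is proved, stated in full; the proofs are below) =====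
def Claim_equal_delete_zeros_from_segments : Prop := ∀ (lst : List Int) (num_to_delete : Int), Dom_delete_zeros_from_segments lst num_to_delete → Spec_delete_zeros_from_segments lst num_to_delete (delete_zeros_from_segments lst num_to_delete)

-- ===== LEMMAS AND PROOFS =====

-- proof-only front-recursive description of the run-length encoding
def pvMerge (p : Int × Int) : List (Int × Int) → List (Int × Int)
  | [] => [p]
  | (w, d) :: t => if w = p.1 then (p.1, p.2 + d) :: t else p :: (w, d) :: t

def pvFRLE : List Int → List (Int × Int)
  | [] => []
  | x :: xs => pvMerge (x, 1) (pvFRLE xs)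

lemma pvMerge_merge (v c : Int) (r : List (Int × Int)) :
    pvMerge (v, c + 1) r = pvMerge (v, c) (pvMerge (v, 1) r) := by
  cases r with
  | nil => simp [pvMerge]
  | cons p t =>
    obtain ⟨w, d⟩ := p
    by_cases hw : w = v
    · subst hw
      simp [pvMerge, add_assoc]
    · simp [pvMerge, hw]

lemma pvMerge_cons_ne (v c x : Int) (hvx : v ≠ x) (r : List (Int × Int)) :
    (v, c) :: pvMerge (x, 1) r = pvMerge (v, c) (pvMerge (x, 1) r) := by
  cases r with
  | nil => simp [pvMerge]; omega
  | cons p t =>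
    obtain ⟨w, d⟩ := p
    by_cases hw : w = x
    · simp [pvMerge, hw]; omega
    · simp [pvMerge, hw]; omega

-- stage 1 equals the front-recursive encoding
lemma pvFoldl_step (xs : List Int) : ∀ (rs : List (Int × Int)) (v c : Int),
    List.foldl pvStep (rs ++ [(v, c)]) xs = rs ++ pvMerge (v, c) (pvFRLE xs) := by
  induction xs with
  | nil => intro rs v c; simp [pvFRLE, pvMerge]
  | cons x xs ih =>
    intro rs v c
    simp only [List.foldl_cons]
    rw [show pvStep (rs ++ [(v, c)]) x =
        if v = x then rs ++ [(v, c + 1)] else (rs ++ [(v, c)]) ++ [(x, 1)] by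
      simp [pvStep]]
    by_cases hvx : v = x
    · subst hvx
      rw [if_pos rfl, ih rs v (c + 1)]
      rw [show pvFRLE (v :: xs) = pvMerge (v, 1) (pvFRLE xs) from rfl]
      rw [pvMerge_merge]
    · rw [if_neg hvx, ih (rs ++ [(v, c)]) x 1, List.append_assoc]
      rw [show pvFRLE (x :: xs) = pvMerge (x, 1) (pvFRLE xs) from rfl]
      rw [← pvMerge_cons_ne v c x hvx]
      rfl

lemma pvFoldl_eq_pvFRLE (lst : List Int) : List.foldl pvStep [] lst = pvFRLE lst := by
  cases lst with
  | nil => simp [pvFRLE]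
  | cons x xs =>
    simp only [List.foldl_cons]
    rw [show pvStep [] x = [] ++ [(x, 1)] by simp [pvStep]]
    rw [pvFoldl_step xs [] x 1]
    simp [pvFRLE]

-- well-formedness of the encoding: positive counts, adjacent values distinct
def pvWF : List (Int × Int) → Prop
  | [] => True
  | [p] => 1 ≤ p.2
  | p :: q :: t => 1 ≤ p.2 ∧ p.1 ≠ q.1 ∧ pvWF (q :: t)

def pvDecodeFull (r : List (Int × Int)) : List Int :=
  r.flatMap (fun p => List.replicate p.2.toNat p.1)

lemma pvDecodeFull_cons (p : Int × Int) (t : List (Int × Int)) :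
    pvDecodeFull (p :: t) = List.replicate p.2.toNat p.1 ++ pvDecodeFull t := by
  simp [pvDecodeFull]

lemma pvFRLE_spec (lst : List Int) :
    pvWF (pvFRLE lst) ∧ pvDecodeFull (pvFRLE lst) = lst := by
  induction lst with
  | nil => simp [pvFRLE, pvWF, pvDecodeFull]
  | cons x xs ih =>
    obtain ⟨hwf, hdec⟩ := ih
    cases h : pvFRLE xs with
    | nil =>
      rw [h] at hdec
      rw [show pvFRLE (x :: xs) = pvMerge (x, 1) (pvFRLE xs) from rfl, h]
      refine ⟨by simp [pvMerge, pvWF], ?_⟩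
      simp only [pvDecodeFull] at hdec
      rw [show pvMerge (x, 1) ([] : List (Int × Int)) = [(x, 1)] from rfl]
      rw [pvDecodeFull_cons]
      simp [pvDecodeFull, ← hdec]
    | cons p t =>
      obtain ⟨w, d⟩ := p
      rw [h] at hwf hdec
      have hd1 : 1 ≤ d := by
        cases t with
        | nil => exact hwf
        | cons q t' => exact hwf.1
      rw [show pvFRLE (x :: xs) = pvMerge (x, 1) (pvFRLE xs) from rfl, h]
      by_cases hw : w = x
      · subst hw
        rw [show pvMerge (w, 1) ((w, d) :: t) = (w, 1 + d) :: t by simp [pvMerge]]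
        constructor
        · cases t with
          | nil => simp [pvWF] at hwf ⊢; omega
          | cons q t' =>
            obtain ⟨h1, h2, h3⟩ := hwf
            exact ⟨by omega, h2, h3⟩
        · rw [pvDecodeFull_cons] at hdec ⊢
          rw [← hdec]
          simp only
          have hnat : (1 + d).toNat = d.toNat + 1 := by omega
          rw [hnat, List.replicate_succ]
          simp
      · rw [show pvMerge (x, 1) ((w, d) :: t) = (x, 1) :: (w, d) :: t by simp [pvMerge, hw]]
        refine ⟨⟨by norm_num, fun hc => hw hc.symm, hwf⟩, ?_⟩
        rw [pvDecodeFull_cons, ← hdec]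
        simp

-- A's loop skips over a nonzero run unchanged
lemma pvALoop_cons_ne (k x : Int) (t : List Int) (hx : x ≠ 0) :
    pvALoop k (x :: t) = x :: pvALoop k t := by
  rw [pvALoop.eq_def]; simp [hx]

lemma pvALoop_replicate_ne (k v : Int) (hv : v ≠ 0) (c : Nat) (t : List Int) :
    pvALoop k (List.replicate c v ++ t) = List.replicate c v ++ pvALoop k t := by
  induction c with
  | zero => simp
  | succ n ih => simp [List.replicate_succ, pvALoop_cons_ne k v _ hv, ih]

lemma pvCountZeros_replicate_append (z : Nat) (t : List Int) (ht : t = [] ∨ ∃ x t', t = x :: t' ∧ x ≠ 0) :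
    pvCountZeros (List.replicate z 0 ++ t) = z := by
  induction z with
  | zero =>
    rcases ht with h | ⟨x, t', h, hx⟩
    · simp [h, pvCountZeros]
    · simp [h, pvCountZeros, hx]
  | succ n ih => simp [List.replicate_succ, pvCountZeros, ih]

-- A's loop on a zero run followed by nothing or a nonzero element: one segment
lemma pvALoop_replicate_zero (k : Int) (z : Nat) (hz : 1 ≤ z) (t : List Int)
    (ht : t = [] ∨ ∃ x t', t = x :: t' ∧ x ≠ 0) :
    pvALoop k (List.replicate z 0 ++ t) =
      List.replicate ((Int.ofNat z - k)).toNat 0 ++ pvALoop k t := by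
  obtain ⟨n, rfl⟩ : ∃ n, z = n + 1 := ⟨z - 1, by omega⟩
  rw [show List.replicate (n+1) (0:Int) ++ t = 0 :: (List.replicate n 0 ++ t) by
    simp [List.replicate_succ]]
  rw [pvALoop.eq_def]
  have hc : pvCountZeros ((0:Int) :: (List.replicate n 0 ++ t)) = n + 1 := by
    simp [pvCountZeros, pvCountZeros_replicate_append n t ht]
  simp only [ne_eq, not_true_eq_false, if_false, hc]
  have hd : List.drop (n+1) ((0:Int) :: (List.replicate n 0 ++ t)) = t := by simp
  rw [hd]

-- expanding a well-formed encoding with shrunk zero runs equals A's loop on the decoded list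
lemma pvALoop_decode (k : Int) : ∀ (r : List (Int × Int)), pvWF r →
    pvALoop k (pvDecodeFull r) = r.flatMap (pvDec k) := by
  intro r
  induction r with
  | nil => intro _; simp [pvDecodeFull, pvALoop]
  | cons p t ih =>
    intro hwf
    obtain ⟨v, c⟩ := p
    have hc1 : 1 ≤ c := by
      cases t with
      | nil => exact hwf
      | cons q t' => exact hwf.1
    have hwt : pvWF t := by
      cases t with
      | nil => trivial
      | cons q t' => exact hwf.2.2
    have hht : pvDecodeFull t = [] ∨
        ∃ y t', pvDecodeFull t = y :: t' ∧ y ≠ v := by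
      cases t with
      | nil => left; simp [pvDecodeFull]
      | cons q t' =>
        obtain ⟨w, d⟩ := q
        have hd1 : 1 ≤ d := by
          cases t' with
          | nil => exact hwf.2.2
          | cons _ _ => exact hwf.2.2.1
        right
        refine ⟨w, List.replicate (d.toNat - 1) w ++ pvDecodeFull t', ?_, ?_⟩
        · rw [pvDecodeFull_cons]
          simp only
          have hnat : d.toNat = (d.toNat - 1) + 1 := by omega
          rw [hnat, List.replicate_succ]
          simp
        · exact fun hwv => hwf.2.1 (by simp [hwv])
    rw [pvDecodeFull_cons, List.flatMap_cons]
    by_cases hv : v = 0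
    · subst hv
      have ht' : pvDecodeFull t = [] ∨ ∃ y t', pvDecodeFull t = y :: t' ∧ y ≠ 0 := by
        rcases hht with hh | ⟨y, t', hh, hy⟩
        · exact Or.inl hh
        · exact Or.inr ⟨y, t', hh, hy⟩
      simp only
      rw [pvALoop_replicate_zero k c.toNat (by omega) (pvDecodeFull t) ht']
      rw [ih hwt]
      congr 1
      have hcc : Int.ofNat c.toNat = c := by rw [Int.ofNat_eq_natCast]; omega
      rw [hcc]
      simp [pvDec]
    · simp only
      rw [pvALoop_replicate_ne k v hv c.toNat (pvDecodeFull t)]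
      rw [ih hwt]
      congr 1
      simp [pvDec, hv]

-- stage 2's foldl-with-append is the flatMap of pvDec
lemma pvFoldl_dec (k : Int) (r : List (Int × Int)) :
    r.foldl (fun out p => out ++ pvDec k p) [] = r.flatMap (pvDec k) := by
  have h : ∀ (acc : List Int), r.foldl (fun out p => out ++ pvDec k p) acc
      = acc ++ r.flatMap (pvDec k) := by
    induction r with
    | nil => intro acc; simp
    | cons p t ih => intro acc; simp [ih, List.append_assoc]
  simpa using h []

-- ===== VERDICT (by name: the statement is the Claim_ definition above) =====
theorem delete_zeros_from_segments_spec : Claim_equal_delete_zeros_from_segments := by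
  intro lst k _
  unfold Spec_delete_zeros_from_segments delete_zeros_from_segments delete_zeros_from_segments_alt
  by_cases hk : k = -1
  · simp [hk]
  · simp only [hk, if_false]
    rw [pvFoldl_eq_pvFRLE, pvFoldl_dec]
    obtain ⟨hwf, hdec⟩ := pvFRLE_spec lst
    rw [← pvALoop_decode k (pvFRLE lst) hwf, hdec]
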